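-- pv_equiv track=rewrite | github.com/XiaoChu-1208/bazi-life-curves | scripts/he_pan_orchestrator.py | split_answers
-- ===== SOURCE A (Python) =====
-- from typing import Dict, List, Optional
--
-- def _prefix(name: str) -> str:
--     return f"{name.lower().replace(' ', '_')}_"
--
-- def split_answers(user_answers: Dict[str, str], names: List[str]) -> Dict[str, Dict[str, str]]:
--     out: Dict[str, Dict[str, str]] = {n: {} for n in names}
--     unmatched: List[str] = []
--     for full_qid, opt in user_answers.items():
--         matched = False
--         for n in names:
--             pre = _prefix(n)
--             if full_qid.startswith(pre):
--                 out[n][full_qid[len(pre):]] = opt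
--                 matched = True
--                 break
--         if not matched:
--             unmatched.append(full_qid)
--     if unmatched:
--         raise ValueError(
--             f"answers contain {len(unmatched)} question_ids without recognised prefix "
--             f"({_prefix(names[0])} ...): {unmatched[:3]}"
--         )
--     return out
-- ===== SOURCE B (Python) =====
-- from typing import Dict, List
--
--
-- def _prefix(name: str) -> str:
--     return f"{name.lower().replace(' ', '_')}_"
--
--
-- def split_answers(user_answers: Dict[str, str], names: List[str]) -> Dict[str, Dict[str, str]]:
--     out: Dict[str, Dict[str, str]] = {}
--     remaining = list(user_answers.items())
--     for n in names:
--         bucket = out.setdefault(n, {})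
--         pre = _prefix(n)
--         still = []
--         for qid, opt in remaining:
--             if qid.startswith(pre):
--                 bucket[qid[len(pre):]] = opt
--             else:
--                 still.append((qid, opt))
--         remaining = still
--     if remaining:
--         unmatched = [qid for qid, _ in remaining]
--         raise ValueError(
--             f"answers contain {len(unmatched)} question_ids without recognised prefix "
--             f"({_prefix(names[0])} ...): {unmatched[:3]}"
--         )
--     return out
-- ===== Notes on version B (the rewrite author's own statement) =====
-- stated objective: alternative
-- what changed: Inverts the loop nest: instead of scanning names for a first match per answer, B iterates names once and partitions a shrinking 'remaining' list of answers by each name's prefix, raising on whatever is left over.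
import Mathlib
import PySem

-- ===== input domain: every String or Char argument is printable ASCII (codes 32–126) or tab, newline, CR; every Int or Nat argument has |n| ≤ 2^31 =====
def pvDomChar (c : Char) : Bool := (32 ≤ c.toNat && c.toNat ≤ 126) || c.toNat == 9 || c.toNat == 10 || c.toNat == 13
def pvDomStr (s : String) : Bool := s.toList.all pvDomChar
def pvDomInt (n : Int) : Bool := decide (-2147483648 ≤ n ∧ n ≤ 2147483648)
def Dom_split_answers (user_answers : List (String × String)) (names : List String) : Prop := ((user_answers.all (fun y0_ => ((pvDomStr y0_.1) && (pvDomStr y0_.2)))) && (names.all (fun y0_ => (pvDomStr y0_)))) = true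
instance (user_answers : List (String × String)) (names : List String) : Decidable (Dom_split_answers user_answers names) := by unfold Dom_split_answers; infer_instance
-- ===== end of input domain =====

-- B inverts A's loop nest: instead of a per-answer first-match scan over names, B walks names once and
-- partitions a shrinking 'remaining' list of answers per name (objective: alternative decomposition).
-- Both programs raise on answers with no recognised prefix; those inputs are excluded by Pre_.

-- ===== PORT A =====
-- _prefix(name) = name.lower().replace(' ', '_') + '_'   (shared one-line helper of both Pythons)
def prefixOf (name : String) : String := PySem.Str.replace (PySem.Str.lower name) " " "_" ++ "_"

-- A's inner 'for n in names: … break': first name whose prefix matches, with the stripped qid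
def firstMatch : List String → String → Option (String × String)
  | [], _ => none
  | n :: rest, q =>
    let pre := prefixOf n
    if PySem.Str.startswith q pre then
      some (n, PySem.Str.slice q (some (PySem.Str.len pre)) none)
    else firstMatch rest q

-- one iteration of A's loop over user_answers.items(): state = (out, unmatched)
def aStep (names : List String)
    (st : PySem.Dict String (PySem.Dict String String) × List String)
    (p : String × String) : PySem.Dict String (PySem.Dict String String) × List String :=
  match firstMatch names p.1 with
  | some (n, suf) => (st.1.modify n PySem.Dict.empty (fun inner => inner.insert suf p.2), st.2)
  | none => (st.1, st.2 ++ [p.1])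

def split_answers (user_answers : List (String × String)) (names : List String) :
    List (String × List (String × String)) :=
  -- out = {n: {} for n in names}
  let out0 := names.foldl (fun d n => d.insert n (PySem.Dict.empty : PySem.Dict String String)) PySem.Dict.empty
  let st := user_answers.foldl (aStep names) (out0, ([] : List String))
  -- 'if unmatched: raise ValueError(...)' — the raising inputs are exactly those excluded by Pre_split_answers
  st.1.items.map (fun q => (q.1, q.2.items))

-- ===== PORT B =====
-- B's inner loop: split 'remaining' by one prefix; state = (out, still)
def bInnerStep (n pre : String)
    (st : PySem.Dict String (PySem.Dict String String) × List (String × String))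
    (p : String × String) : PySem.Dict String (PySem.Dict String String) × List (String × String) :=
  if PySem.Str.startswith p.1 pre then
    (st.1.modify n PySem.Dict.empty
       (fun bucket => bucket.insert (PySem.Str.slice p.1 (some (PySem.Str.len pre)) none) p.2),
     st.2)
  else (st.1, st.2 ++ [p])

-- B's outer loop over names: state = (out, remaining)
def bStep (st : PySem.Dict String (PySem.Dict String String) × List (String × String))
    (n : String) : PySem.Dict String (PySem.Dict String String) × List (String × String) :=
  let out := st.1.setdefault n PySem.Dict.empty
  let pre := prefixOf n
  st.2.foldl (bInnerStep n pre) (out, [])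

def split_answers_alt (user_answers : List (String × String)) (names : List String) :
    List (String × List (String × String)) :=
  let st := names.foldl bStep ((PySem.Dict.empty : PySem.Dict String (PySem.Dict String String)), user_answers)
  -- 'if remaining: raise ValueError(...)' — the raising inputs are exactly those excluded by Pre_split_answers
  st.1.items.map (fun q => (q.1, q.2.items))

-- ===== PRECONDITION & SPEC =====
-- Pre_ excludes exactly the inputs on which the Python A raises (ValueError, or IndexError for
-- names = []): some answer's question_id starts with no recognised name prefix.
def Pre_split_answers (user_answers : List (String × String)) (names : List String) : Prop :=
  ∀ p ∈ user_answers, ∃ n ∈ names, PySem.Str.startswith p.1 (prefixOf n) = true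
instance (user_answers : List (String × String)) (names : List String) :
    Decidable (Pre_split_answers user_answers names) := by unfold Pre_split_answers; infer_instance

def pvWitness_split_answers : (List (String × String)) × List String :=
  ([("li_ming_q1", "A"), ("anna_q2", "B")], ["Li Ming", "anna"])

def Spec_split_answers (user_answers : List (String × String)) (names : List String) (out : List (String × List (String × String))) : Prop := out = split_answers_alt user_answers names
instance (user_answers : List (String × String)) (names : List String) (out : List (String × List (String × String))) : Decidable (Spec_split_answers user_answers names out) := by unfold Spec_split_answers; infer_instance

-- ===== CLAIM (what is proved, stated in full; the proofs are below) =====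
def Claim_equal_split_answers : Prop := ∀ (user_answers : List (String × String)) (names : List String), Dom_split_answers user_answers names → Pre_split_answers user_answers names → Spec_split_answers user_answers names (split_answers user_answers names)

-- ===== LEMMAS AND PROOFS =====

-- inserting (suffix, value) pairs into a bucket, in order
def foldIns (l : List (String × String)) (d : PySem.Dict String String) : PySem.Dict String String :=
  l.foldl (fun b p => b.insert p.1 p.2) d

-- the (suffix, value) pairs A assigns to name n, in user_answers order
def matchedA (names : List String) (n : String) (l : List (String × String)) : List (String × String) :=
  l.filterMap (fun p => match firstMatch names p.1 with
    | some (m, s) => if m = n then some (s, p.2) else none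
    | none => none)

-- the (suffix, value) pairs B assigns to name m, following B's filter chain
def bmatched : List String → List (String × String) → String → List (String × String)
  | [], _, _ => []
  | n :: ns, rem, m =>
    (if n = m then
       (rem.filter (fun p => PySem.Str.startswith p.1 (prefixOf n))).map
         (fun p => (PySem.Str.slice p.1 (some (PySem.Str.len (prefixOf n))) none, p.2))
     else [])
      ++ bmatched ns (rem.filter (fun p => !PySem.Str.startswith p.1 (prefixOf n))) m

-- ---- simp-free equation/unfolding facts ----
theorem firstMatch_cons (n : String) (rest : List String) (q : String) :
    firstMatch (n :: rest) q
      = if PySem.Str.startswith q (prefixOf n) then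
          some (n, PySem.Str.slice q (some (PySem.Str.len (prefixOf n))) none)
        else firstMatch rest q := rfl

theorem bmatched_cons (n : String) (ns : List String) (rem : List (String × String)) (m : String) :
    bmatched (n :: ns) rem m
      = (if n = m then
           (rem.filter (fun p => PySem.Str.startswith p.1 (prefixOf n))).map
             (fun p => (PySem.Str.slice p.1 (some (PySem.Str.len (prefixOf n))) none, p.2))
         else [])
          ++ bmatched ns (rem.filter (fun p => !PySem.Str.startswith p.1 (prefixOf n))) m := rfl

theorem foldIns_append (a b : List (String × String)) (d : PySem.Dict String String) :
    foldIns (a ++ b) d = foldIns b (foldIns a d) := by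
  simp [foldIns, List.foldl_append]

theorem filterMap_eq_filterMap_filter {α β : Type} (l : List α) (f : α → Option β) (c : α → Bool)
    (h : ∀ p, c p = true → f p = none) :
    l.filterMap f = (l.filter (fun p => !c p)).filterMap f := by
  induction l with
  | nil => rfl
  | cons p l ih =>
    by_cases hc : c p = true
    · simp [hc, h p hc, ih]
    · simp at hc
      simp only [List.filter_cons, hc, Bool.not_false, if_true, List.filterMap_cons, ih]

theorem firstMatch_startswith (ns : List String) (q n s : String)
    (h : firstMatch ns q = some (n, s)) : PySem.Str.startswith q (prefixOf n) = true := by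
  induction ns with
  | nil => simp [firstMatch] at h
  | cons m ns ih =>
    rw [firstMatch_cons] at h
    split at h
    · cases h; assumption
    · exact ih h

theorem firstMatch_mem {ns : List String} {q n s : String}
    (h : firstMatch ns q = some (n, s)) : n ∈ ns := by
  induction ns with
  | nil => simp [firstMatch] at h
  | cons m ns ih =>
    rw [firstMatch_cons] at h
    split at h
    · cases h; simp
    · exact List.mem_cons_of_mem _ (ih h)

-- ---- behaviour of matchedA on a cons ----
theorem matchedA_cons_none {names : List String} {p : String × String} (n : String)
    (l : List (String × String)) (h : firstMatch names p.1 = none) :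
    matchedA names n (p :: l) = matchedA names n l := by
  simp [matchedA, h]

theorem matchedA_cons_some_eq {names : List String} {p : String × String} {n s : String}
    (l : List (String × String)) (h : firstMatch names p.1 = some (n, s)) :
    matchedA names n (p :: l) = (s, p.2) :: matchedA names n l := by
  simp [matchedA, h]

theorem matchedA_cons_some_ne {names : List String} {p : String × String} {m n s : String}
    (l : List (String × String)) (h : firstMatch names p.1 = some (m, s)) (hm : m ≠ n) :
    matchedA names n (p :: l) = matchedA names n l := by
  simp [matchedA, h, hm]

-- ---- A's fold, characterised ----
theorem keysA (names : List String) (l : List (String × String))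
    (out : PySem.Dict String (PySem.Dict String String)) (u : List String)
    (h : ∀ n ∈ names, out.contains n = true) :
    ((l.foldl (aStep names) (out, u)).1).keys = out.keys := by
  induction l generalizing out u with
  | nil => rfl
  | cons p l ih =>
    rw [List.foldl_cons]
    cases hfm : firstMatch names p.1 with
    | none => simpa [aStep, hfm] using ih out (u ++ [p.1]) h
    | some ms =>
      obtain ⟨m, s⟩ := ms
      simp only [aStep, hfm]
      rw [ih _ u (fun n hn => by rw [PySem.Dict.contains_modify]; simp [h n hn])]
      rw [PySem.Dict.keys_modify,
        PySem.Dict.keys_insert_of_contains _ _ (h m (firstMatch_mem hfm))]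

theorem getdA (names : List String) (l : List (String × String))
    (out : PySem.Dict String (PySem.Dict String String)) (u : List String) (n : String) :
    ((l.foldl (aStep names) (out, u)).1).getD n PySem.Dict.empty
      = foldIns (matchedA names n l) (out.getD n PySem.Dict.empty) := by
  induction l generalizing out u with
  | nil => rfl
  | cons p l ih =>
    rw [List.foldl_cons]
    cases hfm : firstMatch names p.1 with
    | none =>
      rw [matchedA_cons_none n l hfm]
      simpa [aStep, hfm] using ih out (u ++ [p.1])
    | some ms =>
      obtain ⟨m, s⟩ := ms
      by_cases hm : m = n
      · subst hm
        rw [matchedA_cons_some_eq l hfm]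
        simp only [aStep, hfm]
        rw [ih]
        show _ = foldIns (matchedA names m l) ((_ : PySem.Dict String String).insert s p.2)
        rw [PySem.Dict.getD_modify, if_pos rfl]
      · rw [matchedA_cons_some_ne l hfm hm]
        simp only [aStep, hfm]
        rw [ih, PySem.Dict.getD_modify, if_neg (Ne.symm hm)]

-- ---- B's inner fold, characterised ----
theorem bInnerStep_pos {p : String × String} {pre : String} (n : String)
    (o : PySem.Dict String (PySem.Dict String String)) (s : List (String × String))
    (hp : PySem.Str.startswith p.1 pre = true) :
    bInnerStep n pre (o, s) p
      = (o.modify n PySem.Dict.empty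
          (fun bucket => bucket.insert (PySem.Str.slice p.1 (some (PySem.Str.len pre)) none) p.2), s) := by
  unfold bInnerStep; rw [if_pos hp]

theorem bInnerStep_neg {p : String × String} {pre : String} (n : String)
    (o : PySem.Dict String (PySem.Dict String String)) (s : List (String × String))
    (hp : PySem.Str.startswith p.1 pre = false) :
    bInnerStep n pre (o, s) p = (o, s ++ [p]) := by
  unfold bInnerStep; rw [if_neg (by rw [hp]; simp)]

theorem bInner_snd (n pre : String) (l : List (String × String))
    (o : PySem.Dict String (PySem.Dict String String)) (s : List (String × String)) :
    (l.foldl (bInnerStep n pre) (o, s)).2 = s ++ l.filter (fun p => !PySem.Str.startswith p.1 pre) := by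
  induction l generalizing o s with
  | nil => simp
  | cons p l ih =>
    rw [List.foldl_cons, List.filter_cons]
    by_cases hp : PySem.Str.startswith p.1 pre = true
    · rw [bInnerStep_pos n o s hp]
      simp only [PySem.Str.startswith_eq] at hp
      simp [hp, ih]
    · simp only [Bool.not_eq_true] at hp
      rw [bInnerStep_neg n o s hp]
      simp only [PySem.Str.startswith_eq] at hp
      simp [hp, ih]

theorem bInner_getD (n pre : String) (l : List (String × String))
    (o : PySem.Dict String (PySem.Dict String String)) (s : List (String × String)) (m : String) :
    (l.foldl (bInnerStep n pre) (o, s)).1.getD m PySem.Dict.empty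
      = if m = n then
          foldIns ((l.filter (fun p => PySem.Str.startswith p.1 pre)).map
            (fun p => (PySem.Str.slice p.1 (some (PySem.Str.len pre)) none, p.2)))
            (o.getD n PySem.Dict.empty)
        else o.getD m PySem.Dict.empty := by
  induction l generalizing o s with
  | nil =>
    by_cases hm : m = n
    · subst hm; simp [foldIns]
    · simp [hm]
  | cons p l ih =>
    rw [List.foldl_cons, List.filter_cons]
    by_cases hp : PySem.Str.startswith p.1 pre = true
    · rw [bInnerStep_pos n o s hp]
      simp only [hp, if_true, List.map_cons]
      rw [ih]
      by_cases hm : m = n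
      · subst hm
        rw [if_pos rfl, if_pos rfl, PySem.Dict.getD_modify, if_pos rfl]
        rfl
      · rw [if_neg hm, if_neg hm, PySem.Dict.getD_modify, if_neg hm]
    · simp only [Bool.not_eq_true] at hp
      rw [bInnerStep_neg n o s hp]
      simp only [hp, Bool.false_eq_true, if_false]
      rw [ih]

theorem bInner_keys (n pre : String) (l : List (String × String))
    (o : PySem.Dict String (PySem.Dict String String)) (s : List (String × String))
    (h : o.contains n = true) :
    (l.foldl (bInnerStep n pre) (o, s)).1.keys = o.keys := by
  induction l generalizing o s with
  | nil => rfl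
  | cons p l ih =>
    rw [List.foldl_cons]
    by_cases hp : PySem.Str.startswith p.1 pre = true
    · rw [bInnerStep_pos n o s hp]
      rw [ih _ _ (by rw [PySem.Dict.contains_modify]; simp)]
      rw [PySem.Dict.keys_modify, PySem.Dict.keys_insert_of_contains _ _ h]
    · simp only [Bool.not_eq_true] at hp
      rw [bInnerStep_neg n o s hp]
      exact ih _ _ h

-- ---- B's outer fold, characterised ----
theorem bOuter_getD (ns : List String) (out : PySem.Dict String (PySem.Dict String String))
    (rem : List (String × String)) (m : String) :
    ((ns.foldl bStep (out, rem)).1).getD m PySem.Dict.empty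
      = foldIns (bmatched ns rem m) (out.getD m PySem.Dict.empty) := by
  induction ns generalizing out rem with
  | nil => rfl
  | cons n ns ih =>
    rw [List.foldl_cons]
    show ((ns.foldl bStep (bStep (out, rem) n)).1).getD m PySem.Dict.empty = _
    have hstep : bStep (out, rem) n
        = rem.foldl (bInnerStep n (prefixOf n)) (out.setdefault n PySem.Dict.empty, []) := rfl
    rw [hstep]
    have h2 := bInner_snd n (prefixOf n) rem (out.setdefault n PySem.Dict.empty) []
    have hpair : rem.foldl (bInnerStep n (prefixOf n)) (out.setdefault n PySem.Dict.empty, [])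
        = ((rem.foldl (bInnerStep n (prefixOf n)) (out.setdefault n PySem.Dict.empty, [])).1,
           rem.filter (fun p => !PySem.Str.startswith p.1 (prefixOf n))) := by
      simp only [List.nil_append] at h2
      rw [← h2]
    rw [hpair, ih, bmatched_cons, foldIns_append]
    congr 1
    rw [bInner_getD]
    by_cases hm : m = n
    · subst hm
      rw [if_pos rfl, if_pos rfl, PySem.Dict.getD_setdefault_self]
    · rw [if_neg hm, if_neg (fun h => hm h.symm)]
      show _ = out.getD m PySem.Dict.empty
      rw [PySem.Dict.getD_eq_get?_getD, PySem.Dict.get?_setdefault_of_ne _ _ hm,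
        ← PySem.Dict.getD_eq_get?_getD]

theorem bOuter_keys (ns : List String) (out : PySem.Dict String (PySem.Dict String String))
    (rem : List (String × String)) :
    ((ns.foldl bStep (out, rem)).1).keys = PySem.Set.update out.keys ns := by
  induction ns generalizing out rem with
  | nil => rfl
  | cons n ns ih =>
    rw [List.foldl_cons]
    show ((ns.foldl bStep (bStep (out, rem) n)).1).keys = _
    have hstep : bStep (out, rem) n
        = rem.foldl (bInnerStep n (prefixOf n)) (out.setdefault n PySem.Dict.empty, []) := rfl
    rw [hstep]
    have h2 := bInner_snd n (prefixOf n) rem (out.setdefault n PySem.Dict.empty) []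
    have hpair : rem.foldl (bInnerStep n (prefixOf n)) (out.setdefault n PySem.Dict.empty, [])
        = ((rem.foldl (bInnerStep n (prefixOf n)) (out.setdefault n PySem.Dict.empty, [])).1,
           rem.filter (fun p => !PySem.Str.startswith p.1 (prefixOf n))) := by
      simp only [List.nil_append] at h2
      rw [← h2]
    rw [hpair, ih, bInner_keys _ _ _ _ _ (by rw [PySem.Dict.contains_setdefault]; simp)]
    rw [PySem.Dict.keys_setdefault]
    show _ = PySem.Set.update (PySem.Set.add out.keys n) ns
    unfold PySem.Set.add
    rw [PySem.Dict.contains_eq_decide_mem_keys]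
    by_cases hn : n ∈ out.keys <;> simp [hn, PySem.Set.contains]

-- ---- B's buckets are A's buckets ----
theorem matchedA_nil_of_none (ns : List String) (m : String) (l : List (String × String))
    (h : ∀ p ∈ l, PySem.Str.startswith p.1 (prefixOf m) = false) :
    matchedA ns m l = [] := by
  induction l with
  | nil => rfl
  | cons p l ih =>
    unfold matchedA
    rw [List.filterMap_cons]
    have tail := ih (fun q hq => h q (List.mem_cons_of_mem _ hq))
    cases hfm : firstMatch ns p.1 with
    | none => simpa [matchedA] using tail
    | some ms =>
      obtain ⟨m', s⟩ := ms
      by_cases hm : m' = m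
      · subst hm
        have := firstMatch_startswith ns p.1 m' s hfm
        rw [h p (List.mem_cons_self)] at this
        cases this
      · simpa [hm, matchedA] using tail

theorem matchedA_cons_self (ns : List String) (m : String) (rem : List (String × String)) :
    matchedA (m :: ns) m rem
      = (rem.filter (fun p => PySem.Str.startswith p.1 (prefixOf m))).map
          (fun p => (PySem.Str.slice p.1 (some (PySem.Str.len (prefixOf m))) none, p.2)) := by
  induction rem with
  | nil => rfl
  | cons p rem ih =>
    unfold matchedA
    rw [List.filterMap_cons, List.filter_cons]
    by_cases hp : PySem.Str.startswith p.1 (prefixOf m) = true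
    · have hh : firstMatch (m :: ns) p.1
          = some (m, PySem.Str.slice p.1 (some (PySem.Str.len (prefixOf m))) none) := by
        rw [firstMatch_cons, if_pos hp]
      simp only [hh, hp, if_true, List.map_cons]
      exact congrArg _ ih
    · simp only [Bool.not_eq_true] at hp
      rw [firstMatch_cons, if_neg (by rw [hp]; simp)]
      simp only [hp, Bool.false_eq_true, if_false]
      cases hfm : firstMatch ns p.1 with
      | none => exact ih
      | some ms =>
        obtain ⟨m', s⟩ := ms
        have hm : m' ≠ m := by
          intro he; subst he
          have := firstMatch_startswith ns p.1 m' s hfm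
          rw [hp] at this; cases this
        simp only [hm, if_false]
        exact ih

theorem bmatched_eq_matchedA (ns : List String) (rem : List (String × String)) (m : String) :
    bmatched ns rem m = matchedA ns m rem := by
  induction ns generalizing rem with
  | nil => simp [bmatched, matchedA, firstMatch]
  | cons n ns ih =>
    rw [bmatched_cons, ih]
    by_cases hm : n = m
    · subst hm
      rw [if_pos rfl, matchedA_cons_self]
      rw [matchedA_nil_of_none ns n _ (fun p hp => by
        have := List.of_mem_filter hp
        simpa using this)]
      rw [List.append_nil]
    · rw [if_neg hm, List.nil_append]
      have hstep : matchedA (n :: ns) m rem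
          = (rem.filter (fun p => !PySem.Str.startswith p.1 (prefixOf n))).filterMap
              (fun p => match firstMatch (n :: ns) p.1 with
                | some (m', s) => if m' = m then some (s, p.2) else none
                | none => none) := by
        apply filterMap_eq_filterMap_filter
        intro p hp
        rw [firstMatch_cons, if_pos hp]
        simp [hm]
      rw [hstep]
      unfold matchedA
      apply List.filterMap_congr
      intro p hp
      have hc : PySem.Str.startswith p.1 (prefixOf n) = false := by
        have := List.of_mem_filter hp
        simpa using this
      rw [firstMatch_cons, if_neg (by rw [hc]; simp)]

theorem getD_out0 (l : List String) (d : PySem.Dict String (PySem.Dict String String))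
    (hd : ∀ m, d.getD m PySem.Dict.empty = PySem.Dict.empty) (n : String) :
    (l.foldl (fun d n => d.insert n (PySem.Dict.empty : PySem.Dict String String)) d).getD n PySem.Dict.empty
      = PySem.Dict.empty := by
  induction l generalizing d with
  | nil => exact hd n
  | cons x l ih =>
    refine ih _ (fun m => ?_)
    rw [PySem.Dict.getD_insert]
    split <;> simp [hd]

-- ---- main: the two out-dicts are equal ----
theorem out_eq (user_answers : List (String × String)) (names : List String) :
    (user_answers.foldl (aStep names)
        (names.foldl (fun d n => d.insert n (PySem.Dict.empty : PySem.Dict String String)) PySem.Dict.empty,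
         ([] : List String))).1
      = (names.foldl bStep ((PySem.Dict.empty : PySem.Dict String (PySem.Dict String String)), user_answers)).1 := by
  have hk0 : (names.foldl (fun d n => d.insert n (PySem.Dict.empty : PySem.Dict String String)) PySem.Dict.empty).keys
      = PySem.Set.update ([] : List String) names := by
    have := PySem.Dict.keys_foldl_insert (ν := PySem.Dict String String) names
      (fun _ _ => PySem.Dict.empty) PySem.Dict.empty
    simpa using this
  have hcon : ∀ n ∈ names,
      (names.foldl (fun d n => d.insert n (PySem.Dict.empty : PySem.Dict String String)) PySem.Dict.empty).contains n = true := by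
    intro n hn
    rw [PySem.Dict.contains_eq_decide_mem_keys, hk0]
    simp [PySem.Set.mem_update, hn]
  have hkA := (keysA names user_answers _ [] hcon).trans hk0
  have hkB : ((names.foldl bStep ((PySem.Dict.empty : PySem.Dict String (PySem.Dict String String)), user_answers)).1).keys
      = PySem.Set.update ([] : List String) names := by
    rw [bOuter_keys, PySem.Dict.keys_empty]
  have hnodup : (PySem.Set.update ([] : List String) names).Nodup := PySem.Set.nodup_ofList names
  have hout0 : ∀ m, (names.foldl (fun d n => d.insert n (PySem.Dict.empty : PySem.Dict String String)) PySem.Dict.empty).getD m PySem.Dict.empty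
      = PySem.Dict.empty := by
    intro m
    exact getD_out0 names PySem.Dict.empty (fun k => PySem.Dict.getD_empty k _) m
  have hgd : ∀ m,
      ((user_answers.foldl (aStep names)
          (names.foldl (fun d n => d.insert n (PySem.Dict.empty : PySem.Dict String String)) PySem.Dict.empty,
           ([] : List String))).1).getD m PySem.Dict.empty
        = ((names.foldl bStep ((PySem.Dict.empty : PySem.Dict String (PySem.Dict String String)), user_answers)).1).getD m PySem.Dict.empty := by
    intro m
    rw [getdA, bOuter_getD, PySem.Dict.getD_empty, hout0 m, bmatched_eq_matchedA]
  apply PySem.Dict.ext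
  rw [PySem.Dict.items_eq_map_keys _ (by rw [hkA]; exact hnodup) PySem.Dict.empty,
      PySem.Dict.items_eq_map_keys _ (by rw [hkB]; exact hnodup) PySem.Dict.empty,
      hkA, hkB]
  exact List.map_congr_left (fun k _ => by rw [hgd k])

-- ===== VERDICT (by name: the statement is the Claim_ definition above) =====
theorem split_answers_spec : Claim_equal_split_answers := by
  intro ua names _ _
  unfold Spec_split_answers
  exact congrArg (fun d : PySem.Dict String (PySem.Dict String String) =>
    d.items.map (fun q => (q.1, q.2.items))) (out_eq ua names)
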